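-- pv_equiv track=rewrite | github.com/WarrenKankwe/Functional-Python | week1.py | paired_list
-- ===== SOURCE A (Python) =====
-- def paired_list(strings, integers):
--     '''
--     Function DocString.
--     Combines two lists into a list, pairing them using zip.
--     Handles mismatched list length pairs with placeholders.
--
--     Args:
--     ----------------------------------------
--     strings (list): a list of strings.
--     integers (list): a list of integers.
--
--     Returns:
--     ----------------------------------------
--     list: a list of tuples pairing values from two lists.
--     '''
--
--     result = list(zip(strings, integers))                               # Pair lists
--
--     if len(integers) > len(strings):                                    # If the list containing strings is longer
--         result.extend(('FNU', i) for i in integers[len(strings):])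
--
--     avg = sum(integers) // len(integers)                                # Calculate the average of integers for later use
--     if len(strings) > len(integers):                                    # If the list containing integers is longer
--         result.extend((j, avg) for j in strings[len(integers):])
--
--     return result
-- ===== SOURCE B (Python) =====
-- def paired_list(strings, integers):
--     avg = sum(integers) // len(integers)
--     return [(strings[i] if i < len(strings) else 'FNU',
--              integers[i] if i < len(integers) else avg)
--             for i in range(max(len(strings), len(integers)))]
-- ===== Notes on version B (the rewrite author's own statement) =====
-- stated objective: simpler
-- what changed: Replaces zip plus two conditional tail-extends with a single index-driven comprehension over range(max(len(strings), len(integers))) that picks each element or its placeholder directly.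
import Mathlib
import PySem

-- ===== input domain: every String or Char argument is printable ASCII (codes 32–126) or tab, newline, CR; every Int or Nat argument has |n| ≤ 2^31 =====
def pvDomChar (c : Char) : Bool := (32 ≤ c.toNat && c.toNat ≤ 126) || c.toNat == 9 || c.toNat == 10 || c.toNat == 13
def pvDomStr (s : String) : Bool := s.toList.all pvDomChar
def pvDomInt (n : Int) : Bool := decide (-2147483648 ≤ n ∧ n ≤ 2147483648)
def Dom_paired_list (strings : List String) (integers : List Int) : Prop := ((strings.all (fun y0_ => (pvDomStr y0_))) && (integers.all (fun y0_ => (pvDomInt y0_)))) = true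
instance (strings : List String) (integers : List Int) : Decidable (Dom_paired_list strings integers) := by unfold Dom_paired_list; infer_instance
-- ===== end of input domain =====

-- B replaces zip + two conditional tail-extends with one index-driven pass over range(max(len,len)); objective: simpler.


-- ===== PORT A =====
def paired_list (strings : List String) (integers : List Int) : List (String × Int) :=
  let result := strings.zip integers
  let result := if integers.length > strings.length
    then result ++ (integers.drop strings.length).map (fun i => ("FNU", i))
    else result
  let avg := PySem.Int.floordiv integers.sum integers.length
  if strings.length > integers.length
    then result ++ (strings.drop integers.length).map (fun j => (j, avg))
    else result

-- ===== PORT B =====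
def paired_list_alt (strings : List String) (integers : List Int) : List (String × Int) :=
  let avg := PySem.Int.floordiv integers.sum integers.length
  (List.range (max strings.length integers.length)).map
    (fun i => (strings.getD i "FNU", integers.getD i avg))

-- ===== PRECONDITION & SPEC =====
-- Pre_ excludes integers = [], where Python A (and B) raise ZeroDivisionError computing the average.
def Pre_paired_list (strings : List String) (integers : List Int) : Prop := integers ≠ []
instance (strings : List String) (integers : List Int) : Decidable (Pre_paired_list strings integers) := by unfold Pre_paired_list; infer_instance
def pvWitness_paired_list : List String × List Int := (["a", "b"], [3])

def Spec_paired_list (strings : List String) (integers : List Int) (out : List (String × Int)) : Prop := out = paired_list_alt strings integers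
instance (strings : List String) (integers : List Int) (out : List (String × Int)) : Decidable (Spec_paired_list strings integers out) := by unfold Spec_paired_list; infer_instance

-- ===== CLAIM (what is proved, stated in full; the proofs are below) =====
def Claim_equal_paired_list : Prop := ∀ (strings : List String) (integers : List Int), Dom_paired_list strings integers → Pre_paired_list strings integers → Spec_paired_list strings integers (paired_list strings integers)

-- ===== LEMMAS AND PROOFS =====

-- Common recursive shape both sides reduce to.
def pairedCore (avg : Int) : List String → List Int → List (String × Int)
  | [], [] => []
  | [], y :: ys => ("FNU", y) :: pairedCore avg [] ys
  | x :: xs, [] => (x, avg) :: pairedCore avg xs []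
  | x :: xs, y :: ys => (x, y) :: pairedCore avg xs ys

theorem core_left (avg : Int) : ∀ ys : List Int, pairedCore avg [] ys = ys.map (fun y => ("FNU", y)) := by
  intro ys; induction ys with
  | nil => simp [pairedCore]
  | cons y ys ih => simp [pairedCore, ih]

theorem core_right (avg : Int) : ∀ xs : List String, pairedCore avg xs [] = xs.map (fun x => (x, avg)) := by
  intro xs; induction xs with
  | nil => simp [pairedCore]
  | cons x xs ih => simp [pairedCore, ih]

theorem portA_eq_core (avg : Int) : ∀ (xs : List String) (ys : List Int),
    ((if ys.length > xs.length
        then xs.zip ys ++ (ys.drop xs.length).map (fun i => ("FNU", i))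
        else xs.zip ys) ++
      (if xs.length > ys.length then (xs.drop ys.length).map (fun j => (j, avg)) else []))
      = pairedCore avg xs ys := by
  intro xs
  induction xs with
  | nil =>
    intro ys
    cases ys with
    | nil => simp [pairedCore]
    | cons y ys => simp [core_left]
  | cons x xs ihx =>
    intro ys
    cases ys with
    | nil => simp [core_right]
    | cons y ys =>
      have IH := ihx ys
      simp only [List.length_cons, List.zip_cons_cons, List.drop_succ_cons, gt_iff_lt,
        Nat.add_lt_add_iff_right, pairedCore, List.cons_append]
      split_ifs at IH ⊢ with h h2 <;> simp_all

theorem portB_eq_core (avg : Int) : ∀ (xs : List String) (ys : List Int),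
    (List.range (max xs.length ys.length)).map
      (fun i => (xs.getD i "FNU", ys.getD i avg)) = pairedCore avg xs ys := by
  intro xs
  induction xs with
  | nil =>
    intro ys
    induction ys with
    | nil => simp [pairedCore]
    | cons y ys ih =>
      simp only [List.length_nil, List.length_cons, Nat.max_eq_right (Nat.zero_le _),
        List.range_succ_eq_map, List.map_cons, List.map_map, pairedCore]
      refine congrArg (_ :: ·) ?_
      rw [← Nat.max_eq_right (Nat.zero_le ys.length)] at ih ⊢
      simpa [Function.comp] using ih
  | cons x xs ihx =>
    intro ys
    cases ys with
    | nil =>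
      simp only [List.length_cons, List.length_nil, Nat.max_eq_left (Nat.zero_le _),
        List.range_succ_eq_map, List.map_cons, List.map_map, pairedCore]
      refine congrArg (_ :: ·) ?_
      have := ihx []
      rw [← Nat.max_eq_left (Nat.zero_le xs.length)] at this
      simpa [Function.comp] using this
    | cons y ys =>
      simp only [List.length_cons, Nat.succ_max_succ, List.range_succ_eq_map,
        List.map_cons, List.map_map, pairedCore]
      refine congrArg (_ :: ·) ?_
      simpa [Function.comp] using ihx ys

-- ===== VERDICT (by name: the statement is the Claim_ definition above) =====
theorem paired_list_spec : Claim_equal_paired_list := by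
  intro strings integers _ _
  unfold Spec_paired_list paired_list paired_list_alt
  simp only []
  rw [portB_eq_core, ← portA_eq_core (PySem.Int.floordiv integers.sum integers.length) strings integers]
  split_ifs <;> simp
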